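-- pv_equiv track=rewrite | github.com/Gaz8157/sitrep | tools/aigm/AIGameMaster/data/prompts.py | _catalog_by_faction
-- ===== SOURCE A (Python) =====
-- def _catalog_by_faction(catalog: list) -> str:
--     by_faction: dict[str, list] = {}
--     for e in catalog:
--         f = e.get("faction", "Unknown")
--         if f not in by_faction:
--             by_faction[f] = []
--         if e.get("category") == "group":
--             name = e.get("name")
--             if name:
--                 by_faction[f].append(name)
--     parts = []
--     for faction, names in sorted(by_faction.items()):
--         if faction != "CIV" and names:
--             parts.append(f"{faction}: {', '.join(names[:10])}")
--     return "\n".join(parts) or "No catalog available (join server first)"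
-- ===== SOURCE B (Python) =====
-- def _catalog_by_faction(catalog: list) -> str:
--     pairs = [(e.get("faction", "Unknown"), e.get("name"))
--              for e in catalog
--              if e.get("category") == "group" and e.get("name")]
--     lines = ["{}: {}".format(f, ", ".join([n for g, n in pairs if g == f][:10]))
--              for f in sorted({g for g, _ in pairs})
--              if f != "CIV"]
--     return "\n".join(lines) or "No catalog available (join server first)"
-- ===== Notes on version B (the rewrite author's own statement) =====
-- stated objective: simpler
-- what changed: Replaces the imperative dict-of-lists accumulation over all entries by three declarative comprehensions: filter the catalog once to qualifying (faction, name) pairs, sort the distinct factions, and rebuild each faction's name list by a per-faction scan of the pairs.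
import Mathlib
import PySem

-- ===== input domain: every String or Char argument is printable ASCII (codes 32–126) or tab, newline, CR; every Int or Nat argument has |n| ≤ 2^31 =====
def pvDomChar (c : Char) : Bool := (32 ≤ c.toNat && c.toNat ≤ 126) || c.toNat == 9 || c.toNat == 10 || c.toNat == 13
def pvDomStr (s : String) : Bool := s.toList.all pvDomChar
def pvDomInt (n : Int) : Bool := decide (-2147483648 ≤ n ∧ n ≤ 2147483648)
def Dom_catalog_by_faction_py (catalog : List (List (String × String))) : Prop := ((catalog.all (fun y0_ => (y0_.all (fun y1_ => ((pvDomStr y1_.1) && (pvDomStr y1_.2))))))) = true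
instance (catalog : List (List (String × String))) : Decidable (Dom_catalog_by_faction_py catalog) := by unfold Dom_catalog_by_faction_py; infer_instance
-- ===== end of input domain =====

-- B replaces A's imperative dict-of-lists accumulation by filter + sort of the distinct
-- factions + a per-faction rescan of the qualifying pairs (simpler decomposition, not faster).


-- ===== PORT A =====
-- one iteration of A's 'for e in catalog' loop over the accumulator dict
def pvStepA (d : PySem.Dict String (List String)) (e : List (String × String)) :
    PySem.Dict String (List String) :=
  let ed : PySem.Dict String String := PySem.Dict.mk e
  let f := ed.getD "faction" "Unknown"
  let d1 := if d.contains f then d else d.insert f []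
  if ed.get? "category" == some "group" then
    let name := ed.get? "name"
    if name.getD "" != "" then d1.modify f [] (fun l => l ++ [name.getD ""]) else d1
  else d1

def catalog_by_faction_py (catalog : List (List (String × String))) : String :=
  let byFaction := catalog.foldl pvStepA PySem.Dict.empty
  -- a dict's keys are distinct, so Python's tuple sort of by_faction.items() is the sort by key
  let parts := (PySem.List.sorted byFaction.items (fun p => p.1)).foldl
      (fun parts p =>
        if p.1 != "CIV" && !p.2.isEmpty then
          parts ++ [p.1 ++ ": " ++ PySem.Str.join ", " (PySem.List.slice p.2 none (some 10))]
        else parts) []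
  let s := PySem.Str.join "\n" parts
  if s == "" then "No catalog available (join server first)" else s

-- ===== PORT B =====
-- 'e.get("category") == "group" and e.get("name")' (the comprehension's condition)
def pvQualB (e : List (String × String)) : Bool :=
  (PySem.Dict.mk e).get? "category" == some "group" &&
    ((PySem.Dict.mk e).get? "name").getD "" != ""

-- '(e.get("faction", "Unknown"), e.get("name"))'
def pvPairB (e : List (String × String)) : String × String :=
  ((PySem.Dict.mk e).getD "faction" "Unknown", ((PySem.Dict.mk e).get? "name").getD "")

def catalog_by_faction_py_alt (catalog : List (List (String × String))) : String :=
  let pairs := (catalog.filter pvQualB).map pvPairB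
  let lines :=
    ((PySem.List.sorted (PySem.Set.ofList (pairs.map (fun p => p.1))) (fun x => x)).filter
        (fun f => f != "CIV")).map
      (fun f => f ++ ": " ++ PySem.Str.join ", "
        (PySem.List.slice ((pairs.filter (fun p => p.1 == f)).map (fun p => p.2)) none (some 10)))
  let s := PySem.Str.join "\n" lines
  if s == "" then "No catalog available (join server first)" else s

-- ===== PRECONDITION & SPEC =====
def Spec_catalog_by_faction_py (catalog : List (List (String × String))) (out : String) : Prop := out = catalog_by_faction_py_alt catalog
instance (catalog : List (List (String × String))) (out : String) : Decidable (Spec_catalog_by_faction_py catalog out) := by unfold Spec_catalog_by_faction_py; infer_instance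

-- ===== CLAIM (what is proved, stated in full; the proofs are below) =====
def Claim_equal_catalog_by_faction_py : Prop := ∀ (catalog : List (List (String × String))), Dom_catalog_by_faction_py catalog → Spec_catalog_by_faction_py catalog (catalog_by_faction_py catalog)

-- ===== LEMMAS AND PROOFS =====

-- the faction an entry contributes its key to
def pvF (e : List (String × String)) : String := (PySem.Dict.mk e).getD "faction" "Unknown"
-- the (truthy-named) name an entry contributes
def pvN (e : List (String × String)) : String := ((PySem.Dict.mk e).get? "name").getD ""
-- B's qualifying pairs, and the names B rebuilds per faction
def pvPairs (catalog : List (List (String × String))) : List (String × String) :=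
  (catalog.filter pvQualB).map pvPairB
def pvNames (catalog : List (List (String × String))) (f : String) : List String :=
  ((pvPairs catalog).filter (fun p => p.1 == f)).map (fun p => p.2)

theorem pvDict_get?_eq_none_iff (d : PySem.Dict String (List String)) (k : String) :
    d.get? k = none ↔ k ∉ d.keys := by
  simp only [PySem.Dict.get?, PySem.Dict.keys, Option.map_eq_none_iff, List.find?_eq_none,
    List.mem_map, beq_iff_eq]
  constructor
  · intro h he
    obtain ⟨p, hp, hpk⟩ := he
    exact h p hp hpk
  · intro h p hp hpk
    exact h ⟨p, hp, hpk⟩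

theorem pvDict_contains_iff (d : PySem.Dict String (List String)) (k : String) :
    d.contains k = true ↔ k ∈ d.keys := by
  simp only [PySem.Dict.contains, PySem.Dict.keys, List.any_eq_true, List.mem_map, beq_iff_eq]

theorem pvDict_keys_insert (d : PySem.Dict String (List String)) (k : String) (v : List String) :
    (d.insert k v).keys = if d.contains k then d.keys else d.keys ++ [k] := by
  simp only [PySem.Dict.insert]
  by_cases hc : d.contains k = true
  · simp only [hc, if_true, PySem.Dict.keys, List.map_map]
    refine List.map_congr_left ?_
    intro p _
    by_cases hb : p.1 = k
    · simp [hb]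
    · simp [hb]
  · simp [hc, PySem.Dict.keys]

theorem pvStepA_d1_keys (d : PySem.Dict String (List String)) (f : String) :
    (if d.contains f then d else d.insert f []).keys = PySem.Set.add d.keys f := by
  by_cases hc : d.contains f = true
  · have hk : f ∈ d.keys := (pvDict_contains_iff d f).mp hc
    simp only [hc, if_true, PySem.Set.add]
    simp [hk]
  · have hk : f ∉ d.keys := fun h => hc ((pvDict_contains_iff d f).mpr h)
    have h1 : (d.insert f []).keys = d.keys ++ [f] := by
      rw [pvDict_keys_insert]; simp [hc]
    simp only [hc, PySem.Set.add]
    simp [hk, h1]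

theorem pvStepA_d1_contains (d : PySem.Dict String (List String)) (f : String) :
    (if d.contains f then d else d.insert f []).contains f = true := by
  refine (pvDict_contains_iff _ f).mpr ?_
  rw [pvStepA_d1_keys]
  exact (PySem.Set.mem_add _ _ _).mpr (Or.inr rfl)

theorem pvKeys_stepA (d : PySem.Dict String (List String)) (e : List (String × String)) :
    (pvStepA d e).keys = PySem.Set.add d.keys (pvF e) := by
  simp only [pvStepA, pvF]
  set f := (PySem.Dict.mk e : PySem.Dict String String).getD "faction" "Unknown" with hf
  by_cases hcat : ((PySem.Dict.mk e : PySem.Dict String String).get? "category" == some "group") = true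
  · by_cases hn : (((PySem.Dict.mk e : PySem.Dict String String).get? "name").getD "" != "") = true
    · simp only [hcat, hn, if_true, PySem.Dict.modify, pvDict_keys_insert,
        pvStepA_d1_contains d f, if_true]
      exact pvStepA_d1_keys d f
    · simp only [hcat, hn, if_true]
      exact pvStepA_d1_keys d f
  · simp only [hcat]
    exact pvStepA_d1_keys d f

theorem pvGet?_stepA_ne (d : PySem.Dict String (List String)) (e : List (String × String))
    (f : String) (h : f ≠ pvF e) : (pvStepA d e).get? f = d.get? f := by
  simp only [pvStepA]
  rw [pvF] at h
  set g := (PySem.Dict.mk e : PySem.Dict String String).getD "faction" "Unknown" with hg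
  have hd1 : (if d.contains g then d else d.insert g []).get? f = d.get? f := by
    by_cases hc : d.contains g = true
    · simp [hc]
    · simp [hc, PySem.Dict.get?_insert_of_ne _ _ h]
  by_cases hcat : ((PySem.Dict.mk e : PySem.Dict String String).get? "category" == some "group") = true
  · by_cases hn : (((PySem.Dict.mk e : PySem.Dict String String).get? "name").getD "" != "") = true
    · simp only [hcat, hn, if_true, PySem.Dict.modify]
      rw [PySem.Dict.get?_insert_of_ne _ _ h, hd1]
    · simp only [hcat, hn, if_true]; exact hd1
  · simp only [hcat]; exact hd1

theorem pvStepA_d1_get? (d : PySem.Dict String (List String)) (f : String) :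
    (if d.contains f then d else d.insert f []).get? f = some ((d.get? f).getD []) := by
  by_cases hc : d.contains f = true
  · have hk : f ∈ d.keys := (pvDict_contains_iff d f).mp hc
    cases hv : d.get? f with
    | none => exact absurd hk ((pvDict_get?_eq_none_iff d f).mp hv)
    | some v => simp [hc, hv]
  · have hk : f ∉ d.keys := fun h => hc ((pvDict_contains_iff d f).mpr h)
    have hv : d.get? f = none := (pvDict_get?_eq_none_iff d f).mpr hk
    simp [hc, hv, PySem.Dict.get?_insert_self]

theorem pvGet?_stepA_self (d : PySem.Dict String (List String)) (e : List (String × String)) :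
    (pvStepA d e).get? (pvF e) =
      some ((d.get? (pvF e)).getD [] ++ (if pvQualB e then [pvN e] else [])) := by
  simp only [pvStepA, pvF, pvQualB, pvN]
  set f := (PySem.Dict.mk e : PySem.Dict String String).getD "faction" "Unknown" with hf
  by_cases hcat : ((PySem.Dict.mk e : PySem.Dict String String).get? "category" == some "group") = true
  · by_cases hn : (((PySem.Dict.mk e : PySem.Dict String String).get? "name").getD "" != "") = true
    · simp [hcat, hn, PySem.Dict.modify, PySem.Dict.get?_insert_self,
        PySem.Dict.getD, pvStepA_d1_get? d f]
    · simp [hcat, hn, pvStepA_d1_get? d f]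
  · simp [hcat, pvStepA_d1_get? d f]

theorem pvPairs_cons (e : List (String × String)) (t : List (List (String × String))) :
    pvPairs (e :: t) = (if pvQualB e then [pvPairB e] else []) ++ pvPairs t := by
  by_cases h : pvQualB e = true <;> simp [pvPairs, h]

theorem pvNames_cons (e : List (String × String)) (t : List (List (String × String))) (f : String) :
    pvNames (e :: t) f =
      (if pvQualB e && (pvF e == f) then [pvN e] else []) ++ pvNames t f := by
  have hfe : (pvPairB e).1 = pvF e := rfl
  have hne : (pvPairB e).2 = pvN e := rfl
  by_cases hq : pvQualB e = true
  · by_cases hm : (pvF e == f) = true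
    · simp [pvNames, pvPairs_cons, hq, hm, hfe, hne]
    · simp [pvNames, pvPairs_cons, hq, hm, hfe]
  · simp [pvNames, pvPairs_cons, hq]

theorem pvGet?_fold (catalog : List (List (String × String)))
    (d : PySem.Dict String (List String)) (f : String) :
    (catalog.foldl pvStepA d).get? f =
      if f ∈ d.keys ∨ f ∈ catalog.map pvF then
        some ((d.get? f).getD [] ++ pvNames catalog f)
      else none := by
  induction catalog generalizing d with
  | nil =>
    have hnames : pvNames [] f = [] := rfl
    by_cases hk : f ∈ d.keys
    · cases hv : d.get? f with
      | none => exact absurd hk ((pvDict_get?_eq_none_iff d f).mp hv)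
      | some v => simp [hk, hv, hnames]
    · simp [hk, (pvDict_get?_eq_none_iff d f).mpr hk]
  | cons e t ih =>
    simp only [List.foldl_cons, List.map_cons]
    rw [ih, pvNames_cons]
    have hkeys : ∀ x, x ∈ (pvStepA d e).keys ↔ x ∈ d.keys ∨ x = pvF e := by
      intro x; rw [pvKeys_stepA]; exact PySem.Set.mem_add _ _ _
    by_cases hfe : f = pvF e
    · have hget := pvGet?_stepA_self d e
      rw [← hfe] at hget
      have hc1 : (f ∈ (pvStepA d e).keys ∨ f ∈ List.map pvF t) :=
        Or.inl ((hkeys f).mpr (Or.inr hfe))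
      have hc2 : (f ∈ d.keys ∨ f ∈ pvF e :: List.map pvF t) := Or.inr (by simp [hfe])
      rw [if_pos hc1, if_pos hc2, hget]
      have hb : (pvF e == f) = true := beq_iff_eq.mpr hfe.symm
      by_cases hq : pvQualB e = true
      · simp [hq, hb, List.append_assoc]
      · simp [hq]
    · rw [pvGet?_stepA_ne d e f hfe]
      have hbe : (pvF e == f) = false := beq_eq_false_iff_ne.mpr (fun h => hfe h.symm)
      have hiff : (f ∈ (pvStepA d e).keys ∨ f ∈ t.map pvF) ↔
          (f ∈ d.keys ∨ f ∈ pvF e :: t.map pvF) := by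
        rw [hkeys f]
        constructor
        · rintro (⟨h | h⟩ | h)
          · exact Or.inl h
          · exact absurd h hfe
          · exact Or.inr (List.mem_cons_of_mem _ h)
        · rintro (h | h)
          · exact Or.inl (Or.inl h)
          · rcases List.mem_cons.mp h with h | h
            · exact absurd h hfe
            · exact Or.inr h
      by_cases hc : f ∈ d.keys ∨ f ∈ pvF e :: List.map pvF t
      · rw [if_pos (hiff.mpr hc), if_pos hc]
        simp [hbe]
      · rw [if_neg (fun h => hc (hiff.mp h)), if_neg hc]

theorem pvKeys_fold (catalog : List (List (String × String))) (d : PySem.Dict String (List String)) :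
    (catalog.foldl pvStepA d).keys = PySem.Set.update d.keys (catalog.map pvF) := by
  induction catalog generalizing d with
  | nil => simp [PySem.Set.update_nil]
  | cons e t ih =>
    rw [List.foldl_cons, List.map_cons, PySem.Set.update_cons, ih, pvKeys_stepA]

theorem pvFind_assoc (l : List (String × List String)) (h : (l.map Prod.fst).Nodup)
    (p : String × List String) (hp : p ∈ l) : l.find? (fun q => q.1 == p.1) = some p := by
  induction l with
  | nil => cases hp
  | cons q l ih =>
    rcases List.mem_cons.mp hp with rfl | hp'
    · simp
    · have hq : (q.1 == p.1) = false := by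
        refine beq_eq_false_iff_ne.mpr (fun hqp => ?_)
        have : p.1 ∈ l.map Prod.fst := List.mem_map.mpr ⟨p, hp', rfl⟩
        rw [← hqp] at this
        exact (List.nodup_cons.mp (by simpa using h)).1 this
      simp only [List.find?_cons, hq]
      exact ih (List.nodup_cons.mp (by simpa using h)).2 hp'

theorem pvItems_eq_map_keys (d : PySem.Dict String (List String)) (h : d.keys.Nodup) :
    d.items = d.keys.map (fun k => (k, d.getD k [])) := by
  have hpt : ∀ p ∈ d.items, d.getD p.1 [] = p.2 := by
    intro p hp
    simp [PySem.Dict.getD, PySem.Dict.get?,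
      pvFind_assoc d.items (by simpa [PySem.Dict.keys] using h) p hp]
  calc d.items = d.items.map (fun p => (p.1, d.getD p.1 [])) := by
        refine ((List.map_id d.items).symm).trans ?_
        exact List.map_congr_left (fun p hp => by simp [hpt p hp])
      _ = (d.items.map Prod.fst).map (fun k => (k, d.getD k [])) := by
        rw [List.map_map]; rfl
      _ = d.keys.map (fun k => (k, d.getD k [])) := rfl

theorem pvNames_eq_nil_iff (catalog : List (List (String × String))) (f : String) :
    pvNames catalog f = [] ↔ f ∉ (pvPairs catalog).map (fun p => p.1) := by
  simp only [pvNames, List.map_eq_nil_iff, List.filter_eq_nil_iff, List.mem_map, beq_iff_eq]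
  constructor
  · rintro h ⟨p, hp, rfl⟩; exact h p hp rfl
  · intro h p hp hpf; exact h ⟨p, hp, hpf⟩

theorem pvPF_subset_allF (catalog : List (List (String × String))) (f : String)
    (h : f ∈ (pvPairs catalog).map (fun p => p.1)) : f ∈ catalog.map pvF := by
  simp only [pvPairs, List.mem_map, List.mem_filter] at h ⊢
  obtain ⟨p, ⟨e, ⟨he, _⟩, rfl⟩, rfl⟩ := h
  exact ⟨e, he, rfl⟩

-- sorted distinct factions of the qualifying pairs = the CIV-agnostic filter of the
-- sorted distinct factions of all entries
theorem pvSorted_filter (catalog : List (List (String × String))) :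
    (PySem.List.sorted (PySem.Set.ofList (catalog.map pvF)) (fun x => x)).filter
        (fun f => decide (f ∈ (pvPairs catalog).map (fun p => p.1))) =
      PySem.List.sorted (PySem.Set.ofList ((pvPairs catalog).map (fun p => p.1))) (fun x => x) := by
  have hnodK : (PySem.List.sorted (PySem.Set.ofList (catalog.map pvF)) (fun x => x)).Nodup :=
    ((PySem.List.sorted_perm _ _ _)).symm.nodup (PySem.Set.nodup_ofList _)
  refine (PySem.List.sorted_eq_of_perm_of_pairwise_lt _ _ _ ?_ ?_).symm
  · refine (List.perm_ext_iff_of_nodup (hnodK.filter _) (PySem.Set.nodup_ofList _)).mpr ?_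
    intro a
    simp only [List.mem_filter, PySem.List.mem_sorted, PySem.Set.mem_ofList, decide_eq_true_eq]
    constructor
    · rintro ⟨_, h⟩; exact h
    · intro h; exact ⟨pvPF_subset_allF catalog a h, h⟩
  · exact (PySem.List.sorted_ofList_pairwise_lt _).filter _

set_option maxHeartbeats 1000000 in
theorem pvMain (catalog : List (List (String × String))) :
    catalog_by_faction_py catalog = catalog_by_faction_py_alt catalog := by
  simp only [catalog_by_faction_py, catalog_by_faction_py_alt]
  set byF := catalog.foldl pvStepA PySem.Dict.empty with hbyF
  have hkeys : byF.keys = PySem.Set.ofList (catalog.map pvF) := by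
    rw [hbyF, pvKeys_fold]
    have h0 : (PySem.Dict.empty : PySem.Dict String (List String)).keys = [] := rfl
    rw [h0]
    exact PySem.Set.update_empty _
  have hgetD : ∀ f ∈ catalog.map pvF, byF.getD f [] = pvNames catalog f := by
    intro f hf
    have hget := pvGet?_fold catalog PySem.Dict.empty f
    have h0 : (PySem.Dict.empty : PySem.Dict String (List String)).keys = [] := rfl
    have h0' : (PySem.Dict.empty : PySem.Dict String (List String)).get? f = none := rfl
    rw [h0, h0'] at hget
    simp only [List.not_mem_nil, false_or, hf, if_true, Option.getD_none, List.nil_append] at hget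
    simp only [PySem.Dict.getD]
    rw [hbyF, hget]
    rfl
  have hsorted : PySem.List.sorted byF.items (fun p => p.1) =
      (PySem.List.sorted (PySem.Set.ofList (catalog.map pvF)) (fun x => x)).map
        (fun k => (k, byF.getD k [])) := by
    refine PySem.List.sorted_eq_of_perm_of_pairwise_lt _ _ _ ?_ ?_
    · have hitems : byF.items = byF.keys.map (fun k => (k, byF.getD k [])) :=
        pvItems_eq_map_keys byF (hkeys ▸ PySem.Set.nodup_ofList _)
      rw [hitems, hkeys]
      exact (PySem.List.sorted_perm _ _ _).map _
    · rw [List.pairwise_map]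
      exact PySem.List.sorted_ofList_pairwise_lt _
  simp only [PySem.List.foldl_append_if, List.nil_append]
  rw [hsorted]
  simp only [List.filter_map, List.map_map]
  have hfc : List.filter
        ((fun (p : String × List String) => p.1 != "CIV" && !p.2.isEmpty) ∘
          (fun k => (k, byF.getD k [])))
        (PySem.List.sorted (PySem.Set.ofList (catalog.map pvF)) (fun x => x)) =
      List.filter (fun f => (f != "CIV") && decide (f ∈ (pvPairs catalog).map (fun p => p.1)))
        (PySem.List.sorted (PySem.Set.ofList (catalog.map pvF)) (fun x => x)) := by
    refine List.filter_congr ?_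
    intro f hf
    have hfA : f ∈ catalog.map pvF :=
      (PySem.Set.mem_ofList _ _).mp ((PySem.List.mem_sorted _ _ _ _).mp hf)
    have hn := hgetD f hfA
    simp only [Function.comp_apply, hn]
    by_cases hm : f ∈ (pvPairs catalog).map (fun p => p.1)
    · have hne : pvNames catalog f ≠ [] := fun h => ((pvNames_eq_nil_iff catalog f).mp h) hm
      have hie : (pvNames catalog f).isEmpty = false := by
        simpa [List.isEmpty_iff] using hne
      simp [hm, hie]
    · have hnil : pvNames catalog f = [] := (pvNames_eq_nil_iff catalog f).mpr hm
      have hie : (pvNames catalog f).isEmpty = true := List.isEmpty_iff.mpr hnil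
      simp [hm, hie]
  rw [hfc,
    show List.filter (fun f => (f != "CIV") && decide (f ∈ (pvPairs catalog).map (fun p => p.1)))
        (PySem.List.sorted (PySem.Set.ofList (catalog.map pvF)) (fun x => x)) =
      List.filter (fun f => f != "CIV")
        (List.filter (fun f => decide (f ∈ (pvPairs catalog).map (fun p => p.1)))
          (PySem.List.sorted (PySem.Set.ofList (catalog.map pvF)) (fun x => x))) from
      (List.filter_filter).symm,
    pvSorted_filter]
  have hmap : ∀ f ∈ List.filter (fun f => f != "CIV")
      (PySem.List.sorted (PySem.Set.ofList ((pvPairs catalog).map (fun p => p.1))) (fun x => x)),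
      ((fun (p : String × List String) =>
          p.1 ++ ": " ++ PySem.Str.join ", " (PySem.List.slice p.2 none (some 10))) ∘
        (fun k => (k, byF.getD k []))) f =
      f ++ ": " ++ PySem.Str.join ", " (PySem.List.slice (pvNames catalog f) none (some 10)) := by
    intro f hf
    have hfP : f ∈ (pvPairs catalog).map (fun p => p.1) := by
      have := List.mem_of_mem_filter hf
      rw [PySem.List.mem_sorted] at this
      exact (PySem.Set.mem_ofList _ _).mp this
    have hfA : f ∈ catalog.map pvF := pvPF_subset_allF catalog f hfP
    simp only [Function.comp_apply, hgetD f hfA]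
  rw [List.map_congr_left hmap]
  simp only [pvNames, pvPairs, List.filter_map, List.map_map]

-- ===== VERDICT (by name: the statement is the Claim_ definition above) =====
theorem catalog_by_faction_py_spec : Claim_equal_catalog_by_faction_py := by
  intro catalog _
  show _ = _
  exact pvMain catalog
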